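-- pv_equiv track=rewrite | github.com/JoanaHXU/BiKC-plus | keypose/utils/visualize_sg_insertion.py | _sort_edges_by_importance
-- ===== SOURCE A (Python) =====
-- from typing import Dict, Set, Tuple, List, Optional
--
-- def _sort_edges_by_importance(edges: List[Tuple[str, str]],
--                             object_connections: Set[Tuple[str, str]]) -> List[Tuple[str, str]]:
--     """按重要性排序边，物体间连接优先"""
--     # 分类边
--     object_object_edges = []  # object_1 和 object_2 之间
--     other_object_edges = []   # 其他物体间连接
--     robot_object_edges = []   # 机械臂-物体连接
--     other_edges = []          # 其他连接
--
--     for edge in edges: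
--         if edge in object_connections:
--             if 'object_1' in edge and 'object_2' in edge:
--                 object_object_edges.append(edge)
--             else:
--                 other_object_edges.append(edge)
--         elif any('robot' in node and 'object' in node for node in edge if 'table' not in node):
--             robot_object_edges.append(edge)
--         else:
--             other_edges.append(edge)
--
--     # 按重要性顺序返回
--     return (sorted(object_object_edges) + sorted(other_object_edges) +
--             sorted(robot_object_edges) + sorted(other_edges))
-- ===== SOURCE B (Python) =====
-- from typing import Set, Tuple, List
--
-- def _sort_edges_by_importance(edges: List[Tuple[str, str]],
--                               object_connections: Set[Tuple[str, str]]) -> List[Tuple[str, str]]: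
--     """Sort ALL edges once lexicographically, then emit the sorted list grouped by
--     priority class (0..3) in one comprehension; correct because filtering a sorted
--     list preserves sorted order."""
--     ranked = sorted(edges)
--
--     def priority(edge):
--         if edge in object_connections:
--             return 0 if ('object_1' in edge and 'object_2' in edge) else 1
--         if any('robot' in node and 'object' in node for node in edge if 'table' not in node):
--             return 2
--         return 3
--
--     return [e for k in range(4) for e in ranked if priority(e) == k]
-- ===== Notes on version B (the rewrite author's own statement) =====
-- stated objective: alternative
-- what changed: A classifies edges into four bucket lists first and then runs four separate sorts and concatenates; B performs ONE global lexicographic sort of all edges up front and then emits the already-sorted list grouped by priority class in a single comprehension (no per-bucket sorting), relying on the fact that filtering a sorted list preserves sorted order.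
import Mathlib
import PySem

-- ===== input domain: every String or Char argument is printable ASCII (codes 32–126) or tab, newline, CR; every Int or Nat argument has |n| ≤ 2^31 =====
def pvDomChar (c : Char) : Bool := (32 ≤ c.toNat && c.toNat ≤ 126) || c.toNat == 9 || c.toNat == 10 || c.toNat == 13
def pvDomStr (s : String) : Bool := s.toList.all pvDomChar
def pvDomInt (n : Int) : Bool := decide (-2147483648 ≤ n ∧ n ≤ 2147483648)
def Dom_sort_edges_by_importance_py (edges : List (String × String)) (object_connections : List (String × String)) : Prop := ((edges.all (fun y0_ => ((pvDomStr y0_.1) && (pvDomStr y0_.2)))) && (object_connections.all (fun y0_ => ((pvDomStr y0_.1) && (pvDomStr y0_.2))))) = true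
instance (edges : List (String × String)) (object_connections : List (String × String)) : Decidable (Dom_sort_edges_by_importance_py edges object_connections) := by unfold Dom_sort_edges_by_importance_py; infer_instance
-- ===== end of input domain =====

-- B sorts the whole edge list once lexicographically up front and then emits the already-sorted
-- list grouped by priority class in one pass (no per-bucket sorting), instead of A's
-- classify-into-four-buckets-then-four-sorts; objective: alternative (no speed claim).

-- ===== PORT A =====
-- 'object_1' in edge / 'object_2' in edge: tuple membership = equality with a component
def pvAHasObj12 (edge : String × String) : Bool :=
  (edge.1 == "object_1" || edge.2 == "object_1") && (edge.1 == "object_2" || edge.2 == "object_2")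

-- any('robot' in node and 'object' in node for node in edge if 'table' not in node)
def pvARobotObj (edge : String × String) : Bool :=
  [edge.1, edge.2].any (fun node =>
    !(PySem.Str.isIn "table" node) && (PySem.Str.isIn "robot" node && PySem.Str.isIn "object" node))

-- sorted(xs) on pairs of strings: Python tuple comparison = lexicographic
def pvASorted (xs : List (String × String)) : List (String × String) :=
  PySem.List.sorted2 xs Prod.fst Prod.snd false

def sort_edges_by_importance_py (edges : List (String × String)) (object_connections : List (String × String)) : List (String × String) :=
  let buckets := edges.foldl (fun (s : List (String × String) × List (String × String) × List (String × String) × List (String × String)) edge =>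
    if object_connections.contains edge then
      if pvAHasObj12 edge then (s.1 ++ [edge], s.2.1, s.2.2.1, s.2.2.2)
      else (s.1, s.2.1 ++ [edge], s.2.2.1, s.2.2.2)
    else if pvARobotObj edge then (s.1, s.2.1, s.2.2.1 ++ [edge], s.2.2.2)
    else (s.1, s.2.1, s.2.2.1, s.2.2.2 ++ [edge])) ([], [], [], [])
  pvASorted buckets.1 ++ pvASorted buckets.2.1 ++ pvASorted buckets.2.2.1 ++ pvASorted buckets.2.2.2

-- ===== PORT B =====
def pvBPriority (object_connections : List (String × String)) (edge : String × String) : Int :=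
  if object_connections.contains edge then
    if (edge.1 == "object_1" || edge.2 == "object_1") && (edge.1 == "object_2" || edge.2 == "object_2") then 0 else 1
  else if [edge.1, edge.2].any (fun node =>
      !(PySem.Str.isIn "table" node) && (PySem.Str.isIn "robot" node && PySem.Str.isIn "object" node)) then 2
  else 3

-- ranked = sorted(edges); [e for k in range(4) for e in ranked if priority(e) == k]
def sort_edges_by_importance_py_alt (edges : List (String × String)) (object_connections : List (String × String)) : List (String × String) :=
  let ranked := PySem.List.sorted2 edges Prod.fst Prod.snd false
  (PySem.List.pyRange 0 4 1).flatMap (fun k => ranked.filter (fun e => pvBPriority object_connections e == k))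

-- ===== PRECONDITION & SPEC =====
def Spec_sort_edges_by_importance_py (edges : List (String × String)) (object_connections : List (String × String)) (out : List (String × String)) : Prop := out = sort_edges_by_importance_py_alt edges object_connections
instance (edges : List (String × String)) (object_connections : List (String × String)) (out : List (String × String)) : Decidable (Spec_sort_edges_by_importance_py edges object_connections out) := by unfold Spec_sort_edges_by_importance_py; infer_instance

-- ===== CLAIM (what is proved, stated in full; the proofs are below) =====
def Claim_equal_sort_edges_by_importance_py : Prop := ∀ (edges : List (String × String)) (object_connections : List (String × String)), Dom_sort_edges_by_importance_py edges object_connections → Spec_sort_edges_by_importance_py edges object_connections (sort_edges_by_importance_py edges object_connections)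

-- ===== LEMMAS AND PROOFS =====

-- The four bucket conditions, as predicates on the edge
def pvC0 (oc : List (String × String)) (e : String × String) : Bool := oc.contains e && pvAHasObj12 e
def pvC1 (oc : List (String × String)) (e : String × String) : Bool := oc.contains e && !pvAHasObj12 e
def pvC2 (oc : List (String × String)) (e : String × String) : Bool := !oc.contains e && pvARobotObj e
def pvC3 (oc : List (String × String)) (e : String × String) : Bool := !oc.contains e && !pvARobotObj e

lemma pv_buckets (oc : List (String × String)) (l : List (String × String))
    (s0 s1 s2 s3 : List (String × String)) :
    l.foldl (fun (s : List (String × String) × List (String × String) × List (String × String) × List (String × String)) edge =>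
      if oc.contains edge then
        if pvAHasObj12 edge then (s.1 ++ [edge], s.2.1, s.2.2.1, s.2.2.2)
        else (s.1, s.2.1 ++ [edge], s.2.2.1, s.2.2.2)
      else if pvARobotObj edge then (s.1, s.2.1, s.2.2.1 ++ [edge], s.2.2.2)
      else (s.1, s.2.1, s.2.2.1, s.2.2.2 ++ [edge])) (s0, s1, s2, s3)
    = (s0 ++ l.filter (pvC0 oc), s1 ++ l.filter (pvC1 oc), s2 ++ l.filter (pvC2 oc), s3 ++ l.filter (pvC3 oc)) := by
  induction l generalizing s0 s1 s2 s3 with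
  | nil => simp
  | cons x t ih =>
    rw [List.foldl_cons]
    by_cases h1 : oc.contains x = true
    · have hm : x ∈ oc := by simpa using h1
      by_cases h2 : pvAHasObj12 x = true
      · rw [if_pos h1, if_pos h2, ih]
        have c0 : pvC0 oc x = true := by simp [pvC0, hm, h2]
        have c1 : pvC1 oc x = false := by simp [pvC1, hm, h2]
        have c2 : pvC2 oc x = false := by simp [pvC2, hm]
        have c3 : pvC3 oc x = false := by simp [pvC3, hm]
        rw [List.filter_cons, List.filter_cons, List.filter_cons, List.filter_cons, c0, c1, c2, c3]
        simp
      · have h2' : pvAHasObj12 x = false := by simpa using h2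
        rw [if_pos h1, if_neg h2, ih]
        have c0 : pvC0 oc x = false := by simp [pvC0, hm, h2']
        have c1 : pvC1 oc x = true := by simp [pvC1, hm, h2']
        have c2 : pvC2 oc x = false := by simp [pvC2, hm]
        have c3 : pvC3 oc x = false := by simp [pvC3, hm]
        rw [List.filter_cons, List.filter_cons, List.filter_cons, List.filter_cons, c0, c1, c2, c3]
        simp
    · have hm : x ∉ oc := by simpa using h1
      by_cases h3 : pvARobotObj x = true
      · rw [if_neg h1, if_pos h3, ih]
        have c0 : pvC0 oc x = false := by simp [pvC0, hm]
        have c1 : pvC1 oc x = false := by simp [pvC1, hm]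
        have c2 : pvC2 oc x = true := by simp [pvC2, hm, h3]
        have c3 : pvC3 oc x = false := by simp [pvC3, hm, h3]
        rw [List.filter_cons, List.filter_cons, List.filter_cons, List.filter_cons, c0, c1, c2, c3]
        simp
      · have h3' : pvARobotObj x = false := by simpa using h3
        rw [if_neg h1, if_neg h3, ih]
        have c0 : pvC0 oc x = false := by simp [pvC0, hm]
        have c1 : pvC1 oc x = false := by simp [pvC1, hm]
        have c2 : pvC2 oc x = false := by simp [pvC2, hm, h3']
        have c3 : pvC3 oc x = true := by simp [pvC3, hm, h3']
        rw [List.filter_cons, List.filter_cons, List.filter_cons, List.filter_cons, c0, c1, c2, c3]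
        simp

lemma pv_sorted2_eq_sorted_lex {Q K1 K2 : Type} [LinearOrder K1] [LinearOrder K2]
    (xs : List Q) (k1 : Q → K1) (k2 : Q → K2) :
    PySem.List.sorted2 xs k1 k2 false
      = PySem.List.sorted xs (fun e => (toLex (k1 e, k2 e) : Lex (K1 × K2))) false := by
  simp only [PySem.List.sorted2, PySem.List.sorted, if_neg (by decide : ¬(false = true))]
  have h : (fun (a b : Q) => decide (k1 a < k1 b) || (!decide (k1 b < k1 a) && decide (k2 a < k2 b)))
      = (fun a b : Q => decide ((toLex (k1 a, k2 a) : Lex (K1 × K2)) < toLex (k1 b, k2 b))) := by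
    funext a b
    rw [Bool.eq_iff_iff]
    simp only [Bool.or_eq_true, Bool.and_eq_true, Bool.not_eq_true', decide_eq_true_eq, decide_eq_false_iff_not]
    rw [Prod.Lex.lt_iff]; simp only [ofLex_toLex]
    constructor
    · rintro (h | ⟨h1, h2⟩)
      · exact Or.inl h
      · rcases lt_trichotomy (k1 a) (k1 b) with h' | h' | h'
        · exact Or.inl h'
        · exact Or.inr ⟨h', h2⟩
        · exact absurd h' h1
    · rintro (h | ⟨h1, h2⟩)
      · exact Or.inl h
      · exact Or.inr ⟨by rw [h1]; exact lt_irrefl _, h2⟩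
  rw [h]

lemma pv_sorted2_lex (xs : List (String × String)) :
    PySem.List.sorted2 xs Prod.fst Prod.snd false
      = PySem.List.sorted xs (fun e => (toLex e : Lex (String × String))) false := by
  rw [pv_sorted2_eq_sorted_lex xs Prod.fst Prod.snd]

-- filtering a (lexicographically) sorted list = sorting the filtered list
lemma pv_filter_sorted (p : String × String → Bool) (l : List (String × String)) :
    (PySem.List.sorted l (fun e => (toLex e : Lex (String × String))) false).filter p
      = PySem.List.sorted (l.filter p) (fun e => (toLex e : Lex (String × String))) false := by
  have hinj : Function.Injective (fun e : String × String => (toLex e : Lex (String × String))) :=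
    fun a b h => toLex.injective h
  refine PySem.List.eq_of_perm_of_pairwise_le_of_injective _ hinj ?_ ?_ ?_
  · exact ((PySem.List.sorted_perm l _ false).filter p).trans
      (PySem.List.sorted_perm (l.filter p) _ false).symm
  · exact (PySem.List.sorted_pairwise l _).sublist List.filter_sublist
  · exact PySem.List.sorted_pairwise (l.filter p) _

-- B's 'priority(e) == k' conditions are exactly A's bucket predicates
lemma pv_prio_c0 (oc : List (String × String)) (e : String × String) :
    (pvBPriority oc e == (0 : Int)) = pvC0 oc e := by
  simp only [pvBPriority, pvC0, pvAHasObj12]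
  generalize oc.contains e = a
  generalize ((e.1 == "object_1" || e.2 == "object_1") && (e.1 == "object_2" || e.2 == "object_2")) = b
  generalize ([e.1, e.2].any fun node => !(PySem.Str.isIn "table" node) && (PySem.Str.isIn "robot" node && PySem.Str.isIn "object" node)) = c
  cases a <;> cases b <;> cases c <;> decide

lemma pv_prio_c1 (oc : List (String × String)) (e : String × String) :
    (pvBPriority oc e == (1 : Int)) = pvC1 oc e := by
  simp only [pvBPriority, pvC1, pvAHasObj12]
  generalize oc.contains e = a
  generalize ((e.1 == "object_1" || e.2 == "object_1") && (e.1 == "object_2" || e.2 == "object_2")) = b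
  generalize ([e.1, e.2].any fun node => !(PySem.Str.isIn "table" node) && (PySem.Str.isIn "robot" node && PySem.Str.isIn "object" node)) = c
  cases a <;> cases b <;> cases c <;> decide

lemma pv_prio_c2 (oc : List (String × String)) (e : String × String) :
    (pvBPriority oc e == (2 : Int)) = pvC2 oc e := by
  simp only [pvBPriority, pvC2, pvARobotObj]
  generalize oc.contains e = a
  generalize ((e.1 == "object_1" || e.2 == "object_1") && (e.1 == "object_2" || e.2 == "object_2")) = b
  generalize ([e.1, e.2].any fun node => !(PySem.Str.isIn "table" node) && (PySem.Str.isIn "robot" node && PySem.Str.isIn "object" node)) = c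
  cases a <;> cases b <;> cases c <;> decide

lemma pv_prio_c3 (oc : List (String × String)) (e : String × String) :
    (pvBPriority oc e == (3 : Int)) = pvC3 oc e := by
  simp only [pvBPriority, pvC3, pvARobotObj]
  generalize oc.contains e = a
  generalize ((e.1 == "object_1" || e.2 == "object_1") && (e.1 == "object_2" || e.2 == "object_2")) = b
  generalize ([e.1, e.2].any fun node => !(PySem.Str.isIn "table" node) && (PySem.Str.isIn "robot" node && PySem.Str.isIn "object" node)) = c
  cases a <;> cases b <;> cases c <;> decide

-- ===== VERDICT (by name: the statement is the Claim_ definition above) =====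
theorem sort_edges_by_importance_py_spec : Claim_equal_sort_edges_by_importance_py := by
  intro edges oc _
  unfold Spec_sort_edges_by_importance_py
  unfold sort_edges_by_importance_py sort_edges_by_importance_py_alt
  rw [pv_buckets]
  simp only [List.nil_append]
  have hrange : PySem.List.pyRange 0 4 1 = [0, 1, 2, 3] := by decide
  rw [hrange]
  simp only [List.flatMap_cons, List.flatMap_nil, List.append_nil]
  have h0 : (fun e => pvBPriority oc e == (0 : Int)) = pvC0 oc := funext (pv_prio_c0 oc)
  have h1 : (fun e => pvBPriority oc e == (1 : Int)) = pvC1 oc := funext (pv_prio_c1 oc)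
  have h2 : (fun e => pvBPriority oc e == (2 : Int)) = pvC2 oc := funext (pv_prio_c2 oc)
  have h3 : (fun e => pvBPriority oc e == (3 : Int)) = pvC3 oc := funext (pv_prio_c3 oc)
  rw [h0, h1, h2, h3]
  unfold pvASorted
  rw [pv_sorted2_lex edges, pv_sorted2_lex, pv_sorted2_lex, pv_sorted2_lex, pv_sorted2_lex,
    pv_filter_sorted, pv_filter_sorted, pv_filter_sorted, pv_filter_sorted]
  simp [List.append_assoc]
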